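-- pv_equiv track=rewrite | github.com/theshipsagent/theshipsagent.github.io | oceandatum.ai/create_category_csv.py | smart_categorize
-- ===== SOURCE A (Python) =====
-- def smart_categorize(title, author, publisher, collection):
--     title_lower = title.lower()
--     collection_lower = collection.lower() if collection else ''
--
--     # CHARTERING
--     chartering_keywords = [
--         'charter', 'laytime', 'demurrage', 'fixture', 'freight', 'voyage charter',
--         'time charter', 'bareboat', 'charter party', 'gencon', 'nype', 'baltime'
--     ]
--     if any(kw in title_lower for kw in chartering_keywords) or 'chartering' in collection_lower:
--         return 'I. CHARTERING'
--
--     # MARITIME LAW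
--     law_keywords = [
--         'law', 'legal', 'regulation', 'convention', 'admiralty', 'maritime law',
--         'liability', 'jurisdiction', 'arrest', 'lien', 'salvage', 'collision',
--         'hague', 'hamburg', 'rotterdam', 'marpol', 'solas', 'isps', 'ism code'
--     ]
--     if any(kw in title_lower for kw in law_keywords):
--         return 'II. MARITIME LAW'
--
--     # PORT OPERATIONS
--     port_keywords = [
--         'port', 'terminal', 'stevedore', 'berth', 'wharf', 'harbor', 'harbour',
--         'tugboat', 'tug', 'towboat', 'channel', 'dredging', 'shiphandling'
--     ]
--     if any(kw in title_lower for kw in port_keywords) or 'ports' in collection_lower: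
--         return 'III. PORT OPERATIONS'
--
--     # CARGO OPERATIONS
--     cargo_keywords = [
--         'cargo', 'stowage', 'loading', 'discharge', 'grain', 'coal', 'ore',
--         'steel', 'bulk cargo', 'container', 'breakbulk', 'heavy lift',
--         'dangerous goods', 'hazmat', 'lng', 'petroleum', 'chemical', 'cement'
--     ]
--     if any(kw in title_lower for kw in cargo_keywords) or 'cargo' in collection_lower:
--         return 'IV. CARGO OPERATIONS'
--
--     # SUPPLY CHAIN
--     supply_chain_keywords = [
--         'supply chain', 'logistics', 'distribution', 'warehousing', 'inventory',
--         'multimodal', 'intermodal', 'rail', 'truck', 'barge', 'transportation'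
--     ]
--     if any(kw in title_lower for kw in supply_chain_keywords) or 'supplychain' in collection_lower or 'logistics' in collection_lower:
--         return 'V. SUPPLY CHAIN'
--
--     # TRADE DOCUMENTATION
--     trade_doc_keywords = [
--         'bill of lading', 'letter of credit', 'incoterms', 'export', 'import',
--         'customs', 'trade documentation', 'shipping documents'
--     ]
--     if any(kw in title_lower for kw in trade_doc_keywords) or 'customs' in collection_lower:
--         return 'VI. TRADE DOCUMENTATION'
--
--     # CLAIMS & INSURANCE
--     claims_keywords = [
--         'insurance', 'claim', 'p&i', 'protection and indemnity', 'hull insurance',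
--         'cargo insurance', 'average', 'general average', 'marine insurance'
--     ]
--     if any(kw in title_lower for kw in claims_keywords):
--         return 'VII. CLAIMS & INSURANCE'
--
--     # HISTORICAL
--     historical_keywords = [
--         'history', 'historical', 'evolution', 'development of', 'origins'
--     ]
--     if any(kw in title_lower for kw in historical_keywords) or 'history' in collection_lower:
--         return 'VIII. HISTORICAL'
--
--     # Default
--     if 'shipping' in collection_lower:
--         return 'IV. CARGO OPERATIONS'
--     elif 'transport' in collection_lower or 'econometrics' in collection_lower:
--         return 'V. SUPPLY CHAIN'
--     elif 'missriver' in collection_lower: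
--         return 'III. PORT OPERATIONS'
--     else:
--         return 'V. SUPPLY CHAIN'
-- ===== SOURCE B (Python) =====
-- # B: flat keyword->(priority, category) table; collect ALL matches and take the
-- # minimum-priority one with min(), instead of A's ordered early-return if-blocks.
-- KEYWORDS = [
--     ('T', 'charter', 0, 'I. CHARTERING'),
--     ('T', 'laytime', 0, 'I. CHARTERING'),
--     ('T', 'demurrage', 0, 'I. CHARTERING'),
--     ('T', 'fixture', 0, 'I. CHARTERING'),
--     ('T', 'freight', 0, 'I. CHARTERING'),
--     ('T', 'voyage charter', 0, 'I. CHARTERING'),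
--     ('T', 'time charter', 0, 'I. CHARTERING'),
--     ('T', 'bareboat', 0, 'I. CHARTERING'),
--     ('T', 'charter party', 0, 'I. CHARTERING'),
--     ('T', 'gencon', 0, 'I. CHARTERING'),
--     ('T', 'nype', 0, 'I. CHARTERING'),
--     ('T', 'baltime', 0, 'I. CHARTERING'),
--     ('C', 'chartering', 0, 'I. CHARTERING'),
--     ('T', 'law', 1, 'II. MARITIME LAW'),
--     ('T', 'legal', 1, 'II. MARITIME LAW'),
--     ('T', 'regulation', 1, 'II. MARITIME LAW'),
--     ('T', 'convention', 1, 'II. MARITIME LAW'),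
--     ('T', 'admiralty', 1, 'II. MARITIME LAW'),
--     ('T', 'maritime law', 1, 'II. MARITIME LAW'),
--     ('T', 'liability', 1, 'II. MARITIME LAW'),
--     ('T', 'jurisdiction', 1, 'II. MARITIME LAW'),
--     ('T', 'arrest', 1, 'II. MARITIME LAW'),
--     ('T', 'lien', 1, 'II. MARITIME LAW'),
--     ('T', 'salvage', 1, 'II. MARITIME LAW'),
--     ('T', 'collision', 1, 'II. MARITIME LAW'),
--     ('T', 'hague', 1, 'II. MARITIME LAW'),
--     ('T', 'hamburg', 1, 'II. MARITIME LAW'),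
--     ('T', 'rotterdam', 1, 'II. MARITIME LAW'),
--     ('T', 'marpol', 1, 'II. MARITIME LAW'),
--     ('T', 'solas', 1, 'II. MARITIME LAW'),
--     ('T', 'isps', 1, 'II. MARITIME LAW'),
--     ('T', 'ism code', 1, 'II. MARITIME LAW'),
--     ('T', 'port', 2, 'III. PORT OPERATIONS'),
--     ('T', 'terminal', 2, 'III. PORT OPERATIONS'),
--     ('T', 'stevedore', 2, 'III. PORT OPERATIONS'),
--     ('T', 'berth', 2, 'III. PORT OPERATIONS'),
--     ('T', 'wharf', 2, 'III. PORT OPERATIONS'),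
--     ('T', 'harbor', 2, 'III. PORT OPERATIONS'),
--     ('T', 'harbour', 2, 'III. PORT OPERATIONS'),
--     ('T', 'tugboat', 2, 'III. PORT OPERATIONS'),
--     ('T', 'tug', 2, 'III. PORT OPERATIONS'),
--     ('T', 'towboat', 2, 'III. PORT OPERATIONS'),
--     ('T', 'channel', 2, 'III. PORT OPERATIONS'),
--     ('T', 'dredging', 2, 'III. PORT OPERATIONS'),
--     ('T', 'shiphandling', 2, 'III. PORT OPERATIONS'),
--     ('C', 'ports', 2, 'III. PORT OPERATIONS'),
--     ('T', 'cargo', 3, 'IV. CARGO OPERATIONS'),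
--     ('T', 'stowage', 3, 'IV. CARGO OPERATIONS'),
--     ('T', 'loading', 3, 'IV. CARGO OPERATIONS'),
--     ('T', 'discharge', 3, 'IV. CARGO OPERATIONS'),
--     ('T', 'grain', 3, 'IV. CARGO OPERATIONS'),
--     ('T', 'coal', 3, 'IV. CARGO OPERATIONS'),
--     ('T', 'ore', 3, 'IV. CARGO OPERATIONS'),
--     ('T', 'steel', 3, 'IV. CARGO OPERATIONS'),
--     ('T', 'bulk cargo', 3, 'IV. CARGO OPERATIONS'),
--     ('T', 'container', 3, 'IV. CARGO OPERATIONS'),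
--     ('T', 'breakbulk', 3, 'IV. CARGO OPERATIONS'),
--     ('T', 'heavy lift', 3, 'IV. CARGO OPERATIONS'),
--     ('T', 'dangerous goods', 3, 'IV. CARGO OPERATIONS'),
--     ('T', 'hazmat', 3, 'IV. CARGO OPERATIONS'),
--     ('T', 'lng', 3, 'IV. CARGO OPERATIONS'),
--     ('T', 'petroleum', 3, 'IV. CARGO OPERATIONS'),
--     ('T', 'chemical', 3, 'IV. CARGO OPERATIONS'),
--     ('T', 'cement', 3, 'IV. CARGO OPERATIONS'),
--     ('C', 'cargo', 3, 'IV. CARGO OPERATIONS'),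
--     ('T', 'supply chain', 4, 'V. SUPPLY CHAIN'),
--     ('T', 'logistics', 4, 'V. SUPPLY CHAIN'),
--     ('T', 'distribution', 4, 'V. SUPPLY CHAIN'),
--     ('T', 'warehousing', 4, 'V. SUPPLY CHAIN'),
--     ('T', 'inventory', 4, 'V. SUPPLY CHAIN'),
--     ('T', 'multimodal', 4, 'V. SUPPLY CHAIN'),
--     ('T', 'intermodal', 4, 'V. SUPPLY CHAIN'),
--     ('T', 'rail', 4, 'V. SUPPLY CHAIN'),
--     ('T', 'truck', 4, 'V. SUPPLY CHAIN'),
--     ('T', 'barge', 4, 'V. SUPPLY CHAIN'),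
--     ('T', 'transportation', 4, 'V. SUPPLY CHAIN'),
--     ('C', 'supplychain', 4, 'V. SUPPLY CHAIN'),
--     ('C', 'logistics', 4, 'V. SUPPLY CHAIN'),
--     ('T', 'bill of lading', 5, 'VI. TRADE DOCUMENTATION'),
--     ('T', 'letter of credit', 5, 'VI. TRADE DOCUMENTATION'),
--     ('T', 'incoterms', 5, 'VI. TRADE DOCUMENTATION'),
--     ('T', 'export', 5, 'VI. TRADE DOCUMENTATION'),
--     ('T', 'import', 5, 'VI. TRADE DOCUMENTATION'),
--     ('T', 'customs', 5, 'VI. TRADE DOCUMENTATION'),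
--     ('T', 'trade documentation', 5, 'VI. TRADE DOCUMENTATION'),
--     ('T', 'shipping documents', 5, 'VI. TRADE DOCUMENTATION'),
--     ('C', 'customs', 5, 'VI. TRADE DOCUMENTATION'),
--     ('T', 'insurance', 6, 'VII. CLAIMS & INSURANCE'),
--     ('T', 'claim', 6, 'VII. CLAIMS & INSURANCE'),
--     ('T', 'p&i', 6, 'VII. CLAIMS & INSURANCE'),
--     ('T', 'protection and indemnity', 6, 'VII. CLAIMS & INSURANCE'),
--     ('T', 'hull insurance', 6, 'VII. CLAIMS & INSURANCE'),
--     ('T', 'cargo insurance', 6, 'VII. CLAIMS & INSURANCE'),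
--     ('T', 'average', 6, 'VII. CLAIMS & INSURANCE'),
--     ('T', 'general average', 6, 'VII. CLAIMS & INSURANCE'),
--     ('T', 'marine insurance', 6, 'VII. CLAIMS & INSURANCE'),
--     ('T', 'history', 7, 'VIII. HISTORICAL'),
--     ('T', 'historical', 7, 'VIII. HISTORICAL'),
--     ('T', 'evolution', 7, 'VIII. HISTORICAL'),
--     ('T', 'development of', 7, 'VIII. HISTORICAL'),
--     ('T', 'origins', 7, 'VIII. HISTORICAL'),
--     ('C', 'history', 7, 'VIII. HISTORICAL'),
--     ('C', 'shipping', 8, 'IV. CARGO OPERATIONS'),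
--     ('C', 'transport', 9, 'V. SUPPLY CHAIN'),
--     ('C', 'econometrics', 9, 'V. SUPPLY CHAIN'),
--     ('C', 'missriver', 10, 'III. PORT OPERATIONS'),]
--
-- DEFAULT = (11, 'V. SUPPLY CHAIN')
--
--
-- def smart_categorize(title, author, publisher, collection):
--     tl = title.lower()
--     cl = collection.lower() if collection else ''
--     matches = [(p, cat) for (f, kw, p, cat) in KEYWORDS
--                if kw in (tl if f == 'T' else cl)]
--     return min(matches + [DEFAULT])[1]
-- ===== Notes on version B (the rewrite author's own statement) =====
-- stated objective: alternative
-- what changed: Replaces A's eight ordered if-blocks with early returns by a single flat keyword->(priority,category) table: B collects ALL matching keywords (no short-circuit) and returns the category of the minimum-priority match via min(), with the defaults encoded as high-priority rows and a catch-all entry.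
import Mathlib
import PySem

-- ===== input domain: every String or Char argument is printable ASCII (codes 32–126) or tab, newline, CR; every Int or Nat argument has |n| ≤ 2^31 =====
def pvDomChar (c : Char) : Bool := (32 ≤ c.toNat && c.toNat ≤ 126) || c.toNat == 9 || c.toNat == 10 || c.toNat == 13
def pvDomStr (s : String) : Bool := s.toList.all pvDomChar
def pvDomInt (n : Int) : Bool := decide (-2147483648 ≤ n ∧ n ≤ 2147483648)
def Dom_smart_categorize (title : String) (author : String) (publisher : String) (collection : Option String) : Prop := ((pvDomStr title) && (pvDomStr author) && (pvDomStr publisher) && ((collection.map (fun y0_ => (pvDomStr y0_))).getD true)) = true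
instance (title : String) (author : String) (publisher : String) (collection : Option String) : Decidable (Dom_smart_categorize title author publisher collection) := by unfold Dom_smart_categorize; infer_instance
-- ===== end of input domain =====

/- B replaces A's ordered early-return if-blocks by a flat keyword→(priority,category)
   table: collect all matches and take the min-priority one; objective: alternative. -/


-- ===== PORT A =====
-- literal transliteration: eight keyword lists and the if/elif chain, in source order
def smart_categorize (title : String) (author : String) (publisher : String) (collection : Option String) : String :=
  let title_lower := PySem.Str.lower title
  let collection_lower :=
    match collection with
    | none => ""
    | some c => if c == "" then "" else PySem.Str.lower c
  let chartering_keywords := ["charter", "laytime", "demurrage", "fixture", "freight", "voyage charter",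
    "time charter", "bareboat", "charter party", "gencon", "nype", "baltime"]
  if chartering_keywords.any (fun kw => PySem.Str.isIn kw title_lower) || PySem.Str.isIn "chartering" collection_lower then
    "I. CHARTERING"
  else
  let law_keywords := ["law", "legal", "regulation", "convention", "admiralty", "maritime law",
    "liability", "jurisdiction", "arrest", "lien", "salvage", "collision",
    "hague", "hamburg", "rotterdam", "marpol", "solas", "isps", "ism code"]
  if law_keywords.any (fun kw => PySem.Str.isIn kw title_lower) then
    "II. MARITIME LAW"
  else
  let port_keywords := ["port", "terminal", "stevedore", "berth", "wharf", "harbor", "harbour",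
    "tugboat", "tug", "towboat", "channel", "dredging", "shiphandling"]
  if port_keywords.any (fun kw => PySem.Str.isIn kw title_lower) || PySem.Str.isIn "ports" collection_lower then
    "III. PORT OPERATIONS"
  else
  let cargo_keywords := ["cargo", "stowage", "loading", "discharge", "grain", "coal", "ore",
    "steel", "bulk cargo", "container", "breakbulk", "heavy lift",
    "dangerous goods", "hazmat", "lng", "petroleum", "chemical", "cement"]
  if cargo_keywords.any (fun kw => PySem.Str.isIn kw title_lower) || PySem.Str.isIn "cargo" collection_lower then
    "IV. CARGO OPERATIONS"
  else
  let supply_chain_keywords := ["supply chain", "logistics", "distribution", "warehousing", "inventory",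
    "multimodal", "intermodal", "rail", "truck", "barge", "transportation"]
  if supply_chain_keywords.any (fun kw => PySem.Str.isIn kw title_lower) || PySem.Str.isIn "supplychain" collection_lower || PySem.Str.isIn "logistics" collection_lower then
    "V. SUPPLY CHAIN"
  else
  let trade_doc_keywords := ["bill of lading", "letter of credit", "incoterms", "export", "import",
    "customs", "trade documentation", "shipping documents"]
  if trade_doc_keywords.any (fun kw => PySem.Str.isIn kw title_lower) || PySem.Str.isIn "customs" collection_lower then
    "VI. TRADE DOCUMENTATION"
  else
  let claims_keywords := ["insurance", "claim", "p&i", "protection and indemnity", "hull insurance",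
    "cargo insurance", "average", "general average", "marine insurance"]
  if claims_keywords.any (fun kw => PySem.Str.isIn kw title_lower) then
    "VII. CLAIMS & INSURANCE"
  else
  let historical_keywords := ["history", "historical", "evolution", "development of", "origins"]
  if historical_keywords.any (fun kw => PySem.Str.isIn kw title_lower) || PySem.Str.isIn "history" collection_lower then
    "VIII. HISTORICAL"
  else
  if PySem.Str.isIn "shipping" collection_lower then
    "IV. CARGO OPERATIONS"
  else if PySem.Str.isIn "transport" collection_lower || PySem.Str.isIn "econometrics" collection_lower then
    "V. SUPPLY CHAIN"
  else if PySem.Str.isIn "missriver" collection_lower then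
    "III. PORT OPERATIONS"
  else
    "V. SUPPLY CHAIN"

-- ===== PORT B =====
-- Source B's flat table: (field is title?, keyword, priority, category)
def pvKeywords : List (Bool × String × Int × String) :=
  [(true, "charter", 0, "I. CHARTERING"),
   (true, "laytime", 0, "I. CHARTERING"),
   (true, "demurrage", 0, "I. CHARTERING"),
   (true, "fixture", 0, "I. CHARTERING"),
   (true, "freight", 0, "I. CHARTERING"),
   (true, "voyage charter", 0, "I. CHARTERING"),
   (true, "time charter", 0, "I. CHARTERING"),
   (true, "bareboat", 0, "I. CHARTERING"),
   (true, "charter party", 0, "I. CHARTERING"),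
   (true, "gencon", 0, "I. CHARTERING"),
   (true, "nype", 0, "I. CHARTERING"),
   (true, "baltime", 0, "I. CHARTERING"),
   (false, "chartering", 0, "I. CHARTERING"),
   (true, "law", 1, "II. MARITIME LAW"),
   (true, "legal", 1, "II. MARITIME LAW"),
   (true, "regulation", 1, "II. MARITIME LAW"),
   (true, "convention", 1, "II. MARITIME LAW"),
   (true, "admiralty", 1, "II. MARITIME LAW"),
   (true, "maritime law", 1, "II. MARITIME LAW"),
   (true, "liability", 1, "II. MARITIME LAW"),
   (true, "jurisdiction", 1, "II. MARITIME LAW"),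
   (true, "arrest", 1, "II. MARITIME LAW"),
   (true, "lien", 1, "II. MARITIME LAW"),
   (true, "salvage", 1, "II. MARITIME LAW"),
   (true, "collision", 1, "II. MARITIME LAW"),
   (true, "hague", 1, "II. MARITIME LAW"),
   (true, "hamburg", 1, "II. MARITIME LAW"),
   (true, "rotterdam", 1, "II. MARITIME LAW"),
   (true, "marpol", 1, "II. MARITIME LAW"),
   (true, "solas", 1, "II. MARITIME LAW"),
   (true, "isps", 1, "II. MARITIME LAW"),
   (true, "ism code", 1, "II. MARITIME LAW"),
   (true, "port", 2, "III. PORT OPERATIONS"),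
   (true, "terminal", 2, "III. PORT OPERATIONS"),
   (true, "stevedore", 2, "III. PORT OPERATIONS"),
   (true, "berth", 2, "III. PORT OPERATIONS"),
   (true, "wharf", 2, "III. PORT OPERATIONS"),
   (true, "harbor", 2, "III. PORT OPERATIONS"),
   (true, "harbour", 2, "III. PORT OPERATIONS"),
   (true, "tugboat", 2, "III. PORT OPERATIONS"),
   (true, "tug", 2, "III. PORT OPERATIONS"),
   (true, "towboat", 2, "III. PORT OPERATIONS"),
   (true, "channel", 2, "III. PORT OPERATIONS"),
   (true, "dredging", 2, "III. PORT OPERATIONS"),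
   (true, "shiphandling", 2, "III. PORT OPERATIONS"),
   (false, "ports", 2, "III. PORT OPERATIONS"),
   (true, "cargo", 3, "IV. CARGO OPERATIONS"),
   (true, "stowage", 3, "IV. CARGO OPERATIONS"),
   (true, "loading", 3, "IV. CARGO OPERATIONS"),
   (true, "discharge", 3, "IV. CARGO OPERATIONS"),
   (true, "grain", 3, "IV. CARGO OPERATIONS"),
   (true, "coal", 3, "IV. CARGO OPERATIONS"),
   (true, "ore", 3, "IV. CARGO OPERATIONS"),
   (true, "steel", 3, "IV. CARGO OPERATIONS"),
   (true, "bulk cargo", 3, "IV. CARGO OPERATIONS"),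
   (true, "container", 3, "IV. CARGO OPERATIONS"),
   (true, "breakbulk", 3, "IV. CARGO OPERATIONS"),
   (true, "heavy lift", 3, "IV. CARGO OPERATIONS"),
   (true, "dangerous goods", 3, "IV. CARGO OPERATIONS"),
   (true, "hazmat", 3, "IV. CARGO OPERATIONS"),
   (true, "lng", 3, "IV. CARGO OPERATIONS"),
   (true, "petroleum", 3, "IV. CARGO OPERATIONS"),
   (true, "chemical", 3, "IV. CARGO OPERATIONS"),
   (true, "cement", 3, "IV. CARGO OPERATIONS"),
   (false, "cargo", 3, "IV. CARGO OPERATIONS"),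
   (true, "supply chain", 4, "V. SUPPLY CHAIN"),
   (true, "logistics", 4, "V. SUPPLY CHAIN"),
   (true, "distribution", 4, "V. SUPPLY CHAIN"),
   (true, "warehousing", 4, "V. SUPPLY CHAIN"),
   (true, "inventory", 4, "V. SUPPLY CHAIN"),
   (true, "multimodal", 4, "V. SUPPLY CHAIN"),
   (true, "intermodal", 4, "V. SUPPLY CHAIN"),
   (true, "rail", 4, "V. SUPPLY CHAIN"),
   (true, "truck", 4, "V. SUPPLY CHAIN"),
   (true, "barge", 4, "V. SUPPLY CHAIN"),
   (true, "transportation", 4, "V. SUPPLY CHAIN"),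
   (false, "supplychain", 4, "V. SUPPLY CHAIN"),
   (false, "logistics", 4, "V. SUPPLY CHAIN"),
   (true, "bill of lading", 5, "VI. TRADE DOCUMENTATION"),
   (true, "letter of credit", 5, "VI. TRADE DOCUMENTATION"),
   (true, "incoterms", 5, "VI. TRADE DOCUMENTATION"),
   (true, "export", 5, "VI. TRADE DOCUMENTATION"),
   (true, "import", 5, "VI. TRADE DOCUMENTATION"),
   (true, "customs", 5, "VI. TRADE DOCUMENTATION"),
   (true, "trade documentation", 5, "VI. TRADE DOCUMENTATION"),
   (true, "shipping documents", 5, "VI. TRADE DOCUMENTATION"),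
   (false, "customs", 5, "VI. TRADE DOCUMENTATION"),
   (true, "insurance", 6, "VII. CLAIMS & INSURANCE"),
   (true, "claim", 6, "VII. CLAIMS & INSURANCE"),
   (true, "p&i", 6, "VII. CLAIMS & INSURANCE"),
   (true, "protection and indemnity", 6, "VII. CLAIMS & INSURANCE"),
   (true, "hull insurance", 6, "VII. CLAIMS & INSURANCE"),
   (true, "cargo insurance", 6, "VII. CLAIMS & INSURANCE"),
   (true, "average", 6, "VII. CLAIMS & INSURANCE"),
   (true, "general average", 6, "VII. CLAIMS & INSURANCE"),
   (true, "marine insurance", 6, "VII. CLAIMS & INSURANCE"),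
   (true, "history", 7, "VIII. HISTORICAL"),
   (true, "historical", 7, "VIII. HISTORICAL"),
   (true, "evolution", 7, "VIII. HISTORICAL"),
   (true, "development of", 7, "VIII. HISTORICAL"),
   (true, "origins", 7, "VIII. HISTORICAL"),
   (false, "history", 7, "VIII. HISTORICAL"),
   (false, "shipping", 8, "IV. CARGO OPERATIONS"),
   (false, "transport", 9, "V. SUPPLY CHAIN"),
   (false, "econometrics", 9, "V. SUPPLY CHAIN"),
   (false, "missriver", 10, "III. PORT OPERATIONS")]

-- Python str '<' (code-point lexicographic), written out over the char lists
def pvStrLt : List Char → List Char → Bool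
  | [], [] => false
  | [], _ :: _ => true
  | _ :: _, [] => false
  | a :: as, b :: bs =>
      if a.toNat < b.toNat then true
      else if b.toNat < a.toNat then false
      else pvStrLt as bs

-- Python tuple '<' on (int, str) pairs
def pvLexLt (a b : Int × String) : Bool :=
  a.1 < b.1 || (a.1 == b.1 && pvStrLt a.2.toList b.2.toList)

-- Python min() over a nonempty list (first minimal element kept); the [] case is
-- unreachable in smart_categorize_alt (the DEFAULT entry is always appended)
def pvMin : List (Int × String) → Int × String
  | [] => (0, "")
  | x :: xs => xs.foldl (fun a b => if pvLexLt b a then b else a) x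

def smart_categorize_alt (title : String) (author : String) (publisher : String) (collection : Option String) : String :=
  let tl := PySem.Str.lower title
  let cl :=
    match collection with
    | none => ""
    | some c => if c == "" then "" else PySem.Str.lower c
  let ms := pvKeywords.filterMap (fun e =>
    if PySem.Str.isIn e.2.1 (if e.1 then tl else cl) then some (e.2.2.1, e.2.2.2) else none)
  (pvMin (ms ++ [((11 : Int), "V. SUPPLY CHAIN")])).2

-- ===== PRECONDITION & SPEC =====
def Spec_smart_categorize (title : String) (author : String) (publisher : String) (collection : Option String) (out : String) : Prop := out = smart_categorize_alt title author publisher collection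
instance (title : String) (author : String) (publisher : String) (collection : Option String) (out : String) : Decidable (Spec_smart_categorize title author publisher collection out) := by unfold Spec_smart_categorize; infer_instance

-- ===== CLAIM (what is proved, stated in full; the proofs are below) =====
def Claim_equal_smart_categorize : Prop := ∀ (title : String) (author : String) (publisher : String) (collection : Option String), Dom_smart_categorize title author publisher collection → Spec_smart_categorize title author publisher collection (smart_categorize title author publisher collection)

-- ===== LEMMAS AND PROOFS =====

-- proof-side helpers: grouped view of the flat keyword table
def pvF (tl cl : String) (fk : Bool × String) : Bool :=
  PySem.Str.isIn fk.2 (if fk.1 then tl else cl)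

def pvMatches (t : List (Bool × String × Int × String)) (tl cl : String) : List (Int × String) :=
  t.filterMap (fun e =>
    if PySem.Str.isIn e.2.1 (if e.1 then tl else cl) then some (e.2.2.1, e.2.2.2) else none)

def pvBlock (p : Int) (c : String) (kws : List (Bool × String)) : List (Bool × String × Int × String) :=
  kws.map (fun fk => (fk.1, fk.2, p, c))

def pvFlat (rs : List (Int × String × List (Bool × String))) : List (Bool × String × Int × String) :=
  rs.flatMap fun r => pvBlock r.1 r.2.1 r.2.2

def pvGrouped : List (Int × String × List (Bool × String)) :=
  [   ((0 : Int), "I. CHARTERING", [(true, "charter"), (true, "laytime"), (true, "demurrage"), (true, "fixture"), (true, "freight"), (true, "voyage charter"), (true, "time charter"), (true, "bareboat"), (true, "charter party"), (true, "gencon"), (true, "nype"), (true, "baltime"), (false, "chartering")]),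
   ((1 : Int), "II. MARITIME LAW", [(true, "law"), (true, "legal"), (true, "regulation"), (true, "convention"), (true, "admiralty"), (true, "maritime law"), (true, "liability"), (true, "jurisdiction"), (true, "arrest"), (true, "lien"), (true, "salvage"), (true, "collision"), (true, "hague"), (true, "hamburg"), (true, "rotterdam"), (true, "marpol"), (true, "solas"), (true, "isps"), (true, "ism code")]),
   ((2 : Int), "III. PORT OPERATIONS", [(true, "port"), (true, "terminal"), (true, "stevedore"), (true, "berth"), (true, "wharf"), (true, "harbor"), (true, "harbour"), (true, "tugboat"), (true, "tug"), (true, "towboat"), (true, "channel"), (true, "dredging"), (true, "shiphandling"), (false, "ports")]),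
   ((3 : Int), "IV. CARGO OPERATIONS", [(true, "cargo"), (true, "stowage"), (true, "loading"), (true, "discharge"), (true, "grain"), (true, "coal"), (true, "ore"), (true, "steel"), (true, "bulk cargo"), (true, "container"), (true, "breakbulk"), (true, "heavy lift"), (true, "dangerous goods"), (true, "hazmat"), (true, "lng"), (true, "petroleum"), (true, "chemical"), (true, "cement"), (false, "cargo")]),
   ((4 : Int), "V. SUPPLY CHAIN", [(true, "supply chain"), (true, "logistics"), (true, "distribution"), (true, "warehousing"), (true, "inventory"), (true, "multimodal"), (true, "intermodal"), (true, "rail"), (true, "truck"), (true, "barge"), (true, "transportation"), (false, "supplychain"), (false, "logistics")]),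
   ((5 : Int), "VI. TRADE DOCUMENTATION", [(true, "bill of lading"), (true, "letter of credit"), (true, "incoterms"), (true, "export"), (true, "import"), (true, "customs"), (true, "trade documentation"), (true, "shipping documents"), (false, "customs")]),
   ((6 : Int), "VII. CLAIMS & INSURANCE", [(true, "insurance"), (true, "claim"), (true, "p&i"), (true, "protection and indemnity"), (true, "hull insurance"), (true, "cargo insurance"), (true, "average"), (true, "general average"), (true, "marine insurance")]),
   ((7 : Int), "VIII. HISTORICAL", [(true, "history"), (true, "historical"), (true, "evolution"), (true, "development of"), (true, "origins"), (false, "history")]),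
   ((8 : Int), "IV. CARGO OPERATIONS", [(false, "shipping")]),
   ((9 : Int), "V. SUPPLY CHAIN", [(false, "transport"), (false, "econometrics")]),
   ((10 : Int), "III. PORT OPERATIONS", [(false, "missriver")])]

def pvChainP : List (Int × String × List (Bool × String)) → String → String → Int × String
  | [], _, _ => (11, "V. SUPPLY CHAIN")
  | (p, c, kws) :: rs, tl, cl => if kws.any (pvF tl cl) then (p, c) else pvChainP rs tl cl

def pvOK (rs : List (Int × String × List (Bool × String))) : Prop :=
  List.Pairwise (fun a b => pvLexLt (b.1, b.2.1) (a.1, a.2.1) = false) rs ∧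
  ∀ r ∈ rs, pvLexLt (r.1, r.2.1) (r.1, r.2.1) = false ∧
    pvLexLt ((11 : Int), "V. SUPPLY CHAIN") (r.1, r.2.1) = false

theorem pvMatches_def (t : List (Bool × String × Int × String)) (tl cl : String) :
    (t.filterMap (fun e =>
      if PySem.Str.isIn e.2.1 (if e.1 then tl else cl) then some (e.2.2.1, e.2.2.2) else none))
      = pvMatches t tl cl := rfl

theorem pvTable_flat : pvKeywords = pvFlat pvGrouped := by rfl

theorem pvOK_grouped : pvOK pvGrouped := by
  constructor
  · decide
  · decide

theorem pv_foldl_keep (acc : Int × String) (ys : List (Int × String))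
    (h : ∀ y ∈ ys, pvLexLt y acc = false) :
    ys.foldl (fun a b => if pvLexLt b a then b else a) acc = acc := by
  induction ys with
  | nil => rfl
  | cons y ys ih =>
      rw [List.foldl_cons]
      have hy := h y (List.mem_cons_self ..)
      rw [hy]
      simp only [Bool.false_eq_true, if_false]
      exact ih fun z hz => h z (List.mem_cons_of_mem _ hz)

theorem pvMin_all_eq (mb ms : List (Int × String)) (p : Int) (c : String)
    (hmb : ∀ y ∈ mb, y = (p, c)) (hne : mb ≠ [])
    (hself : pvLexLt (p, c) (p, c) = false)
    (hms : ∀ y ∈ ms, pvLexLt y (p, c) = false) :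
    pvMin (mb ++ ms) = (p, c) := by
  match mb, hne with
  | x :: t, _ =>
    have hx : x = (p, c) := hmb x (List.mem_cons_self ..)
    subst hx
    rw [List.cons_append]
    show (t ++ ms).foldl (fun a b => if pvLexLt b a then b else a) (p, c) = (p, c)
    apply pv_foldl_keep
    intro y hy
    rcases List.mem_append.1 hy with h | h
    · rw [hmb y (List.mem_cons_of_mem _ h)]; exact hself
    · exact hms y h

theorem pv_mem_block {p : Int} {c : String} {kws : List (Bool × String)} {tl cl : String}
    {y : Int × String} (hy : y ∈ pvMatches (pvBlock p c kws) tl cl) : y = (p, c) := by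
  simp only [pvMatches, pvBlock, List.mem_filterMap, List.mem_map] at hy
  obtain ⟨e, ⟨fk, _, hfk⟩, he⟩ := hy
  subst hfk
  simp at he
  exact he.2.symm

theorem pv_block_nil {p : Int} {c : String} {kws : List (Bool × String)} {tl cl : String}
    (h : kws.any (pvF tl cl) = false) : pvMatches (pvBlock p c kws) tl cl = [] := by
  induction kws with
  | nil => rfl
  | cons fk kws ih =>
      simp only [List.any_cons, Bool.or_eq_false_iff] at h
      simp only [pvBlock, List.map_cons, pvMatches, List.filterMap_cons]
      rw [show (PySem.Str.isIn (fk.1, fk.2, p, c).2.1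
        (if (fk.1, fk.2, p, c).1 then tl else cl)) = false from h.1]
      simp only [Bool.false_eq_true, if_false]
      exact ih h.2

theorem pv_block_ne {p : Int} {c : String} {kws : List (Bool × String)} {tl cl : String}
    (h : kws.any (pvF tl cl) = true) : pvMatches (pvBlock p c kws) tl cl ≠ [] := by
  induction kws with
  | nil => simp at h
  | cons fk kws ih =>
      simp only [List.any_cons, Bool.or_eq_true_iff] at h
      simp only [pvBlock, List.map_cons, pvMatches, List.filterMap_cons]
      by_cases hc : PySem.Str.isIn fk.2 (if fk.1 then tl else cl)
      · rw [show (PySem.Str.isIn (fk.1, fk.2, p, c).2.1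
          (if (fk.1, fk.2, p, c).1 then tl else cl)) = true from hc]
        simp
      · rcases h with h | h
        · exact absurd h hc
        · simp only [show (PySem.Str.isIn (fk.1, fk.2, p, c).2.1
            (if (fk.1, fk.2, p, c).1 then tl else cl)) = false from by simpa using hc,
            Bool.false_eq_true, if_false]
          exact ih h

theorem pv_mem_flat {rs : List (Int × String × List (Bool × String))} {tl cl : String}
    {y : Int × String} (hy : y ∈ pvMatches (pvFlat rs) tl cl) :
    ∃ r ∈ rs, y = (r.1, r.2.1) := by
  simp only [pvMatches, List.mem_filterMap, pvFlat, List.mem_flatMap] at hy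
  obtain ⟨e, ⟨r, hr, he⟩, hfe⟩ := hy
  refine ⟨r, hr, ?_⟩
  have : e ∈ pvBlock r.1 r.2.1 r.2.2 := he
  simp only [pvBlock, List.mem_map] at this
  obtain ⟨fk, _, hfk⟩ := this
  subst hfk
  simp at hfe
  exact hfe.2.symm

theorem pvMin_chain (rs : List (Int × String × List (Bool × String))) (h : pvOK rs)
    (tl cl : String) :
    pvMin (pvMatches (pvFlat rs) tl cl ++ [((11 : Int), "V. SUPPLY CHAIN")])
      = pvChainP rs tl cl := by
  induction rs with
  | nil => rfl
  | cons r rs ih =>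
      obtain ⟨p, c, kws⟩ := r
      obtain ⟨hpw, hall⟩ := h
      rw [List.pairwise_cons] at hpw
      have hself := (hall _ (List.mem_cons_self ..)).1
      have hdef := (hall _ (List.mem_cons_self ..)).2
      have hflat : pvFlat ((p, c, kws) :: rs) = pvBlock p c kws ++ pvFlat rs := by
        simp [pvFlat]
      have hsplit : pvMatches (pvFlat ((p, c, kws) :: rs)) tl cl
          = pvMatches (pvBlock p c kws) tl cl ++ pvMatches (pvFlat rs) tl cl := by
        rw [hflat]; simp [pvMatches]
      rw [hsplit, List.append_assoc]
      by_cases hb : kws.any (pvF tl cl)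
      · rw [show pvChainP ((p, c, kws) :: rs) tl cl = (p, c) from by simp [pvChainP, hb]]
        apply pvMin_all_eq _ _ _ _ (fun y hy => pv_mem_block hy) (pv_block_ne hb) hself
        intro y hy
        rcases List.mem_append.1 hy with h | h
        · obtain ⟨r', hr', hy'⟩ := pv_mem_flat h
          rw [hy']
          exact hpw.1 r' hr'
        · simp only [List.mem_singleton] at h
          rw [h]; exact hdef
      · rw [pv_block_nil (by simpa using hb), List.nil_append]
        rw [show pvChainP ((p, c, kws) :: rs) tl cl = pvChainP rs tl cl from by
          simp [pvChainP, hb]]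
        exact ih ⟨hpw.2, fun r hr => hall r (List.mem_cons_of_mem _ hr)⟩

theorem pv_core_eq (tl cl : String) :
    (let chartering_keywords := ["charter", "laytime", "demurrage", "fixture", "freight", "voyage charter",
      "time charter", "bareboat", "charter party", "gencon", "nype", "baltime"]
     if chartering_keywords.any (fun kw => PySem.Str.isIn kw tl) || PySem.Str.isIn "chartering" cl then
      "I. CHARTERING"
     else
     let law_keywords := ["law", "legal", "regulation", "convention", "admiralty", "maritime law",
      "liability", "jurisdiction", "arrest", "lien", "salvage", "collision",
      "hague", "hamburg", "rotterdam", "marpol", "solas", "isps", "ism code"]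
     if law_keywords.any (fun kw => PySem.Str.isIn kw tl) then
      "II. MARITIME LAW"
     else
     let port_keywords := ["port", "terminal", "stevedore", "berth", "wharf", "harbor", "harbour",
      "tugboat", "tug", "towboat", "channel", "dredging", "shiphandling"]
     if port_keywords.any (fun kw => PySem.Str.isIn kw tl) || PySem.Str.isIn "ports" cl then
      "III. PORT OPERATIONS"
     else
     let cargo_keywords := ["cargo", "stowage", "loading", "discharge", "grain", "coal", "ore",
      "steel", "bulk cargo", "container", "breakbulk", "heavy lift",
      "dangerous goods", "hazmat", "lng", "petroleum", "chemical", "cement"]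
     if cargo_keywords.any (fun kw => PySem.Str.isIn kw tl) || PySem.Str.isIn "cargo" cl then
      "IV. CARGO OPERATIONS"
     else
     let supply_chain_keywords := ["supply chain", "logistics", "distribution", "warehousing", "inventory",
      "multimodal", "intermodal", "rail", "truck", "barge", "transportation"]
     if supply_chain_keywords.any (fun kw => PySem.Str.isIn kw tl) || PySem.Str.isIn "supplychain" cl || PySem.Str.isIn "logistics" cl then
      "V. SUPPLY CHAIN"
     else
     let trade_doc_keywords := ["bill of lading", "letter of credit", "incoterms", "export", "import",
      "customs", "trade documentation", "shipping documents"]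
     if trade_doc_keywords.any (fun kw => PySem.Str.isIn kw tl) || PySem.Str.isIn "customs" cl then
      "VI. TRADE DOCUMENTATION"
     else
     let claims_keywords := ["insurance", "claim", "p&i", "protection and indemnity", "hull insurance",
      "cargo insurance", "average", "general average", "marine insurance"]
     if claims_keywords.any (fun kw => PySem.Str.isIn kw tl) then
      "VII. CLAIMS & INSURANCE"
     else
     let historical_keywords := ["history", "historical", "evolution", "development of", "origins"]
     if historical_keywords.any (fun kw => PySem.Str.isIn kw tl) || PySem.Str.isIn "history" cl then
      "VIII. HISTORICAL"
     else
     if PySem.Str.isIn "shipping" cl then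
      "IV. CARGO OPERATIONS"
     else if PySem.Str.isIn "transport" cl || PySem.Str.isIn "econometrics" cl then
      "V. SUPPLY CHAIN"
     else if PySem.Str.isIn "missriver" cl then
      "III. PORT OPERATIONS"
     else
      "V. SUPPLY CHAIN") =
    (pvMin ((pvKeywords.filterMap (fun e =>
        if PySem.Str.isIn e.2.1 (if e.1 then tl else cl) then some (e.2.2.1, e.2.2.2) else none))
        ++ [((11 : Int), "V. SUPPLY CHAIN")])).2 := by
  rw [pvMatches_def, pvTable_flat, pvMin_chain pvGrouped pvOK_grouped]
  simp only [pvGrouped, pvChainP, pvF, List.any_cons, List.any_nil, Bool.false_eq_true,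
    if_true, if_false, Bool.or_false, Bool.or_assoc, apply_ite (f := Prod.snd)]

-- ===== VERDICT (by name: the statement is the Claim_ definition above) =====
theorem smart_categorize_spec : Claim_equal_smart_categorize := by
  intro title author publisher collection _
  unfold Spec_smart_categorize smart_categorize smart_categorize_alt
  exact pv_core_eq _ _
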